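-- pv_equiv track=rewrite | github.com/TuringQ/deepquantum | src/deepquantum/photonic/ansatz.py | apply_creation
-- ===== SOURCE A (Python) =====
-- def apply_creation(state, k):
--     """Apply the creation operator :math:`f^†_k` to a Slater determinant.
--
--     Args:
--         state: An ordered list of occupied orbitals (p1, ..., pN) where p1 < p2 < ... < pN.
--         k: The index of the orbital to be created.
--
--     """
--     state = list(state)
--
--     if k in state:
--         return None  # 轨道已被占据，Pauli不相容
--
--     # 找到插入位置（保持有序）
--     n = sum(1 for p in state if p < k)  # k 前面有 n 个轨道
--     sign = (-1) ** n
--     new_state = tuple(sorted(state + [k]))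
--
--     return (new_state, sign)
-- ===== SOURCE B (Python) =====
-- from bisect import bisect_left
--
-- def apply_creation(state, k):
--     s = sorted(state)
--     p = bisect_left(s, k)
--     if p < len(s) and s[p] == k:
--         return None  # orbital already occupied
--     return (tuple(s[:p] + [k] + s[p:]), (-1) ** p)
-- ===== Notes on version B (the rewrite author's own statement) =====
-- stated objective: alternative
-- what changed: B sorts once and uses bisect_left to find the insertion point p, deciding occupancy by s[p] == k and building the result by slicing around p with sign (-1)**p, instead of A's linear membership scan, linear counting scan, and re-sorting of state + [k].
import Mathlib
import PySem

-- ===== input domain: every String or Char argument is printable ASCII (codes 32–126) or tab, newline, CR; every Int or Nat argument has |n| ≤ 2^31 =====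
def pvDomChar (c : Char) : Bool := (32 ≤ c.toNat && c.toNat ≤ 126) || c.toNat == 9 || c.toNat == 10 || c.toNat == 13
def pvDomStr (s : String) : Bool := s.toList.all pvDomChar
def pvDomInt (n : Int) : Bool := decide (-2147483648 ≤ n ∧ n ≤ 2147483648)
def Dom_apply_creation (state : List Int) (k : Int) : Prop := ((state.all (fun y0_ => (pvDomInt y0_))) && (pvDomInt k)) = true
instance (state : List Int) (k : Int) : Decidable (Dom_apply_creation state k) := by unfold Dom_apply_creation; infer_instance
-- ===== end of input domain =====

-- B replaces A's membership scan + counting scan + re-sort by a single sort, a bisect_left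
-- lookup and slice-based insertion (alternative decomposition, same asymptotic cost).


-- ===== PORT A =====
-- `sum(1 for p in state if p < k)` is the count of elements < k (0/1-sum = countP).
def apply_creation (state : List Int) (k : Int) : Option (List Int × Int) :=
  if state.contains k then none
  else
    let n := state.countP (fun p => decide (p < k))
    let sign : Int := (-1) ^ n
    some (PySem.List.sorted (state ++ [k]) (fun x => x), sign)

-- ===== PORT B =====
-- s[:p] / s[p:] with 0 ≤ p ≤ len s are List.take / List.drop; bisect_left is PySem.List.bisectLeft.
def apply_creation_alt (state : List Int) (k : Int) : Option (List Int × Int) :=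
  let s := PySem.List.sorted state (fun x => x)
  let p := PySem.List.bisectLeft s k
  if p < s.length && (s.getD p 0 == k) then none
  else some (s.take p ++ k :: s.drop p, (-1) ^ p)

-- ===== PRECONDITION & SPEC =====
def Spec_apply_creation (state : List Int) (k : Int) (out : Option (List Int × Int)) : Prop := out = apply_creation_alt state k
instance (state : List Int) (k : Int) (out : Option (List Int × Int)) : Decidable (Spec_apply_creation state k out) := by unfold Spec_apply_creation; infer_instance

-- ===== CLAIM (what is proved, stated in full; the proofs are below) =====
def Claim_equal_apply_creation : Prop := ∀ (state : List Int) (k : Int), Dom_apply_creation state k → Spec_apply_creation state k (apply_creation state k)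

-- ===== LEMMAS AND PROOFS =====

-- Membership of k in state is exactly "the bisect position holds k" in the sorted copy.
theorem pv_contains_iff (state : List Int) (k : Int) :
    state.contains k =
      ((PySem.List.bisectLeft (PySem.List.sorted state (fun x => x)) k <
          (PySem.List.sorted state (fun x => x)).length : Bool) &&
        ((PySem.List.sorted state (fun x => x)).getD
            (PySem.List.bisectLeft (PySem.List.sorted state (fun x => x)) k) 0 == k)) := by
  set s := PySem.List.sorted state (fun x => x) with hs
  set p := PySem.List.bisectLeft s k with hp
  have hpw : s.Pairwise (fun a b => a ≤ b) := PySem.List.sorted_pairwise state (fun x => x)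
  obtain ⟨hple, hlt, hge⟩ := PySem.List.bisectLeft_spec s k hpw
  have hmem : k ∈ state ↔ k ∈ s := ((PySem.List.sorted_perm state (fun x => x) false).mem_iff).symm
  by_cases h : k ∈ state
  · have hk : k ∈ s := hmem.mp h
    obtain ⟨j, hj, hjk⟩ := List.getElem_of_mem hk
    have hjp : ¬ j < p := fun hc => absurd hjk (by have := hlt j hj hc; omega)
    have hplt : p < s.length := lt_of_le_of_lt (Nat.not_lt.mp hjp) hj
    have hple' : s[p] ≤ s[j] := by
      rcases Nat.lt_or_ge p j with hc | hc
      · exact List.pairwise_iff_getElem.mp hpw p j hplt hj hc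
      · have : p = j := le_antisymm (Nat.not_lt.mp hjp) hc
        simp [this]
    have hkp : s[p] = k := le_antisymm (hjk ▸ hple') (hge p hplt (le_refl p))
    simp [h, hplt, hkp]
  · have hk : k ∉ s := fun hc => h (hmem.mpr hc)
    have : ¬ (p < s.length ∧ s.getD p 0 = k) := by
      rintro ⟨hplt, hkp⟩
      exact hk (hkp ▸ (List.getD_eq_getElem s 0 hplt ▸ List.getElem_mem hplt))
    simp only [List.contains_eq_mem, h, decide_false]
    by_cases hplt : p < s.length
    · have hne : s.getD p 0 ≠ k := fun hc => this ⟨hplt, hc⟩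
      rw [List.getD_eq_getElem s 0 hplt] at hne
      simp [hplt, hne]
    · simp [hplt]

-- All elements of the take-prefix are < k, all of the drop-suffix are ≥ k.
theorem pv_take_lt (s : List Int) (k : Int) (hpw : s.Pairwise (fun a b => a ≤ b)) :
    ∀ x ∈ s.take (PySem.List.bisectLeft s k), x < k := by
  obtain ⟨hple, hlt, hge⟩ := PySem.List.bisectLeft_spec s k hpw
  intro x hx
  obtain ⟨j, hj, hjx⟩ := List.getElem_of_mem hx
  have hj' : j < PySem.List.bisectLeft s k := by
    have := hj; simp [List.length_take] at this; omega
  have hjs : j < s.length := lt_of_lt_of_le hj' hple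
  have := hlt j hjs hj'
  have : s[j] < k := this
  rw [← hjx, List.getElem_take]
  exact this

theorem pv_drop_ge (s : List Int) (k : Int) (hpw : s.Pairwise (fun a b => a ≤ b)) :
    ∀ x ∈ s.drop (PySem.List.bisectLeft s k), k ≤ x := by
  obtain ⟨hple, hlt, hge⟩ := PySem.List.bisectLeft_spec s k hpw
  intro x hx
  obtain ⟨j, hj, hjx⟩ := List.getElem_of_mem hx
  rw [List.getElem_drop] at hjx
  have hjs : PySem.List.bisectLeft s k + j < s.length := by
    have := hj; simp [List.length_drop] at this; omega
  have := hge _ hjs (Nat.le_add_right _ _)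
  omega

-- A's count of orbitals below k equals the bisect position in the sorted copy.
theorem pv_count_eq (state : List Int) (k : Int) :
    state.countP (fun p => decide (p < k)) =
      PySem.List.bisectLeft (PySem.List.sorted state (fun x => x)) k := by
  set s := PySem.List.sorted state (fun x => x) with hs
  set p := PySem.List.bisectLeft s k with hp
  have hpw : s.Pairwise (fun a b => a ≤ b) := PySem.List.sorted_pairwise state (fun x => x)
  obtain ⟨hple, hlt, hge⟩ := PySem.List.bisectLeft_spec s k hpw
  have hc : state.countP (fun x => decide (x < k)) = s.countP (fun x => decide (x < k)) :=
    ((PySem.List.sorted_perm state (fun x => x) false).countP_eq _).symm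
  rw [hc, ← List.take_append_drop p s, List.countP_append]
  have h1 : (s.take p).countP (fun x => decide (x < k)) = (s.take p).length :=
    List.countP_eq_length.mpr (fun x hx => by simp [pv_take_lt s k hpw x hx])
  have h2 : (s.drop p).countP (fun x => decide (x < k)) = 0 :=
    List.countP_eq_zero.mpr (fun x hx => by simp; exact pv_drop_ge s k hpw x hx)
  rw [h1, h2, List.length_take]
  omega

-- Inserting k at the bisect position yields exactly sorted(state + [k]).
theorem pv_insert_eq (state : List Int) (k : Int) :
    PySem.List.sorted (state ++ [k]) (fun x => x) =
      (PySem.List.sorted state (fun x => x)).take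
          (PySem.List.bisectLeft (PySem.List.sorted state (fun x => x)) k) ++
        k :: (PySem.List.sorted state (fun x => x)).drop
          (PySem.List.bisectLeft (PySem.List.sorted state (fun x => x)) k) := by
  set s := PySem.List.sorted state (fun x => x) with hs
  set p := PySem.List.bisectLeft s k with hp
  have hpw : s.Pairwise (fun a b => a ≤ b) := PySem.List.sorted_pairwise state (fun x => x)
  apply PySem.List.sorted_id_eq_of_perm_of_pairwise
  · have h1 : (s.take p ++ k :: s.drop p).Perm (k :: s) := by
      have h := @List.perm_middle _ k (s.take p) (s.drop p)
      rwa [List.take_append_drop] at h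
    have h2 : (k :: s).Perm (k :: state) :=
      (PySem.List.sorted_perm state (fun x => x) false).cons k
    exact h1.trans (h2.trans (List.perm_append_singleton k state).symm)
  · rw [List.pairwise_append]
    refine ⟨hpw.sublist (List.take_sublist p s), ?_, ?_⟩
    · rw [List.pairwise_cons]
      exact ⟨pv_drop_ge s k hpw, hpw.sublist (List.drop_sublist p s)⟩
    · intro x hx y hy
      have hxk : x < k := pv_take_lt s k hpw x hx
      rcases List.mem_cons.mp hy with rfl | hy'
      · exact le_of_lt hxk
      · exact le_of_lt (lt_of_lt_of_le hxk (pv_drop_ge s k hpw y hy'))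

-- ===== VERDICT (by name: the statement is the Claim_ definition above) =====
theorem apply_creation_spec : Claim_equal_apply_creation := by
  intro state k _
  unfold Spec_apply_creation apply_creation apply_creation_alt
  simp only
  rw [pv_contains_iff state k]
  split
  · rfl
  · rw [pv_count_eq state k, pv_insert_eq state k]
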